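-- pv_equiv track=rewrite | github.com/FranFer03/LoRaMesh | nuevo.py | calculate_days_since_epoch
-- ===== SOURCE A (Python) =====
-- def is_leap_year(year):
--     return (year % 4 == 0 and (year % 100 != 0 or year % 400 == 0))
--
-- def days_in_month(month, year):
--     days_per_month = [31, 28, 31, 30, 31, 30, 31, 31, 30, 31, 30, 31]
--     if month == 2 and is_leap_year(year):
--         return 29
--     return days_per_month[month - 1]
--
-- def calculate_days_since_epoch(year, month, day, hour, minute, second):
--     days = (year - 1970) * 365 + (year - 1969) // 4
--     for m in range(1, month):
--         days += days_in_month(m, year)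
--     days += day - 1
--     total_seconds = days * 86400
--     total_seconds += hour * 3600 + minute * 60 + second
--
--     return total_seconds
-- ===== SOURCE B (Python) =====
-- # Loop-free re-implementation: cumulative days-before-month table + single leap-day correction.
-- _CUM = [0, 31, 59, 90, 120, 151, 181, 212, 243, 273, 304, 334, 365]
--
-- def is_leap_year(year):
--     return (year % 4 == 0 and (year % 100 != 0 or year % 400 == 0))
--
-- def calculate_days_since_epoch(year, month, day, hour, minute, second):
--     days = (year - 1970) * 365 + (year - 1969) // 4
--     if month > 1:
--         days += _CUM[month - 1]
--         if month > 2 and is_leap_year(year):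
--             days += 1
--     days += day - 1
--     return days * 86400 + hour * 3600 + minute * 60 + second
-- ===== Notes on version B (the rewrite author's own statement) =====
-- stated objective: simpler
-- what changed: Replaces the per-month loop summing days_in_month with a fixed cumulative days-before-month table lookup plus a single leap-day correction for month > 2.
import Mathlib
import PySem

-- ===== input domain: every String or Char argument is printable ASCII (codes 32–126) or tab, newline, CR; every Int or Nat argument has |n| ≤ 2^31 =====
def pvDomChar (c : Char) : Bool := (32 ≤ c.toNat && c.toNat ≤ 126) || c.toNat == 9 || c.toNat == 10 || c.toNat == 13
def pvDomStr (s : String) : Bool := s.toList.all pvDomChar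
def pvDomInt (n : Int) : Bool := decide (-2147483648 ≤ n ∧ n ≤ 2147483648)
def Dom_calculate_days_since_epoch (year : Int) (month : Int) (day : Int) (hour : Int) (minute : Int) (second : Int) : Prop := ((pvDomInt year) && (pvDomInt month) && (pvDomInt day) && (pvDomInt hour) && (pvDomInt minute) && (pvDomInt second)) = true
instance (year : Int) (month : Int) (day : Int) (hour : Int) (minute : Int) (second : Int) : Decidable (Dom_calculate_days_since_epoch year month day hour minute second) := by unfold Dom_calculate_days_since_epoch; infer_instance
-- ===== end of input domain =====

-- ===== PORT A =====
def pv_is_leap_year (year : Int) : Bool :=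
  PySem.Int.mod year 4 == 0 && (!(PySem.Int.mod year 100 == 0) || PySem.Int.mod year 400 == 0)

def pv_days_in_month (month : Int) (year : Int) : Int :=
  let days_per_month : List Int := [31, 28, 31, 30, 31, 30, 31, 31, 30, 31, 30, 31]
  if month == 2 && pv_is_leap_year year then 29
  else (PySem.List.pyGet? days_per_month (month - 1)).getD 0  -- none (IndexError) only when month ≥ 14; excluded by Pre_

def calculate_days_since_epoch (year : Int) (month : Int) (day : Int) (hour : Int) (minute : Int) (second : Int) : Int :=
  let days := (year - 1970) * 365 + PySem.Int.floordiv (year - 1969) 4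
  let days := (PySem.List.pyRange 1 month 1).foldl (fun d m => d + pv_days_in_month m year) days
  let days := days + day - 1
  let total_seconds := days * 86400
  let total_seconds := total_seconds + (hour * 3600 + minute * 60 + second)
  total_seconds

-- ===== PORT B =====
-- B: cumulative days-before-month table lookup + single leap-day correction (no month loop);
-- is_leap_year is identical in Source A and Source B, so both ports share pv_is_leap_year.
def pvCUM : List Int := [0, 31, 59, 90, 120, 151, 181, 212, 243, 273, 304, 334, 365]

def calculate_days_since_epoch_alt (year : Int) (month : Int) (day : Int) (hour : Int) (minute : Int) (second : Int) : Int :=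
  let days := (year - 1970) * 365 + PySem.Int.floordiv (year - 1969) 4
  let days :=
    if month > 1 then
      let d := days + (PySem.List.pyGet? pvCUM (month - 1)).getD 0  -- none (IndexError) only when month ≥ 14; excluded by Pre_
      if month > 2 && pv_is_leap_year year then d + 1 else d
    else days
  let days := days + day - 1
  days * 86400 + hour * 3600 + minute * 60 + second

-- ===== PRECONDITION & SPEC =====
-- A raises IndexError (days_per_month[12]) exactly when month ≥ 14; B raises there too (_CUM[13]).
def Pre_calculate_days_since_epoch (year : Int) (month : Int) (day : Int) (hour : Int) (minute : Int) (second : Int) : Prop := month ≤ 13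
instance (year : Int) (month : Int) (day : Int) (hour : Int) (minute : Int) (second : Int) : Decidable (Pre_calculate_days_since_epoch year month day hour minute second) := by unfold Pre_calculate_days_since_epoch; infer_instance
def pvWitness_calculate_days_since_epoch : Int × Int × Int × Int × Int × Int := (2024, 3, 1, 0, 0, 0)

def Spec_calculate_days_since_epoch (year : Int) (month : Int) (day : Int) (hour : Int) (minute : Int) (second : Int) (out : Int) : Prop := out = calculate_days_since_epoch_alt year month day hour minute second
instance (year : Int) (month : Int) (day : Int) (hour : Int) (minute : Int) (second : Int) (out : Int) : Decidable (Spec_calculate_days_since_epoch year month day hour minute second out) := by unfold Spec_calculate_days_since_epoch; infer_instance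

-- ===== CLAIM (what is proved, stated in full; the proofs are below) =====
def Claim_equal_calculate_days_since_epoch : Prop := ∀ (year : Int) (month : Int) (day : Int) (hour : Int) (minute : Int) (second : Int), Dom_calculate_days_since_epoch year month day hour minute second → Pre_calculate_days_since_epoch year month day hour minute second → Spec_calculate_days_since_epoch year month day hour minute second (calculate_days_since_epoch year month day hour minute second)

-- ===== LEMMAS AND PROOFS =====

-- ===== VERDICT (by name: the statement is the Claim_ definition above) =====
theorem calculate_days_since_epoch_spec : Claim_equal_calculate_days_since_epoch := by
  intro year month day hour minute second _ hpre
  unfold Pre_calculate_days_since_epoch at hpre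
  unfold Spec_calculate_days_since_epoch
  unfold calculate_days_since_epoch calculate_days_since_epoch_alt
  dsimp only
  by_cases h1 : month ≤ 1
  · rw [PySem.List.pyRange_one_eq_nil h1]
    simp only [List.foldl_nil]
    rw [if_neg (by omega)]
    ring
  · have h2 : 2 ≤ month := by omega
    rw [if_pos (by omega)]
    interval_cases month
    · rw [show PySem.List.pyRange 1 2 1 = [1] from by decide]
      simp only [List.foldl_cons, List.foldl_nil, pv_days_in_month, pvCUM, PySem.List.pyGet?, PySem.List.pyIdx?]
      norm_num
      ring
    · rw [show PySem.List.pyRange 1 3 1 = [1,2] from by decide]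
      simp only [List.foldl_cons, List.foldl_nil, pv_days_in_month, pvCUM, PySem.List.pyGet?, PySem.List.pyIdx?]
      norm_num
      cases hy : pv_is_leap_year year <;> simp [hy] <;> ring
    · rw [show PySem.List.pyRange 1 4 1 = [1,2,3] from by decide]
      simp only [List.foldl_cons, List.foldl_nil, pv_days_in_month, pvCUM, PySem.List.pyGet?, PySem.List.pyIdx?]
      norm_num
      cases hy : pv_is_leap_year year <;> simp [hy] <;> ring
    · rw [show PySem.List.pyRange 1 5 1 = [1,2,3,4] from by decide]
      simp only [List.foldl_cons, List.foldl_nil, pv_days_in_month, pvCUM, PySem.List.pyGet?, PySem.List.pyIdx?]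
      norm_num
      cases hy : pv_is_leap_year year <;> simp [hy] <;> ring
    · rw [show PySem.List.pyRange 1 6 1 = [1,2,3,4,5] from by decide]
      simp only [List.foldl_cons, List.foldl_nil, pv_days_in_month, pvCUM, PySem.List.pyGet?, PySem.List.pyIdx?]
      norm_num
      cases hy : pv_is_leap_year year <;> simp [hy] <;> ring
    · rw [show PySem.List.pyRange 1 7 1 = [1,2,3,4,5,6] from by decide]
      simp only [List.foldl_cons, List.foldl_nil, pv_days_in_month, pvCUM, PySem.List.pyGet?, PySem.List.pyIdx?]
      norm_num
      cases hy : pv_is_leap_year year <;> simp [hy] <;> ring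
    · rw [show PySem.List.pyRange 1 8 1 = [1,2,3,4,5,6,7] from by decide]
      simp only [List.foldl_cons, List.foldl_nil, pv_days_in_month, pvCUM, PySem.List.pyGet?, PySem.List.pyIdx?]
      norm_num
      cases hy : pv_is_leap_year year <;> simp [hy] <;> ring
    · rw [show PySem.List.pyRange 1 9 1 = [1,2,3,4,5,6,7,8] from by decide]
      simp only [List.foldl_cons, List.foldl_nil, pv_days_in_month, pvCUM, PySem.List.pyGet?, PySem.List.pyIdx?]
      norm_num
      cases hy : pv_is_leap_year year <;> simp [hy] <;> ring
    · rw [show PySem.List.pyRange 1 10 1 = [1,2,3,4,5,6,7,8,9] from by decide]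
      simp only [List.foldl_cons, List.foldl_nil, pv_days_in_month, pvCUM, PySem.List.pyGet?, PySem.List.pyIdx?]
      norm_num
      cases hy : pv_is_leap_year year <;> simp [hy] <;> ring
    · rw [show PySem.List.pyRange 1 11 1 = [1,2,3,4,5,6,7,8,9,10] from by decide]
      simp only [List.foldl_cons, List.foldl_nil, pv_days_in_month, pvCUM, PySem.List.pyGet?, PySem.List.pyIdx?]
      norm_num
      cases hy : pv_is_leap_year year <;> simp [hy] <;> ring
    · rw [show PySem.List.pyRange 1 12 1 = [1,2,3,4,5,6,7,8,9,10,11] from by decide]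
      simp only [List.foldl_cons, List.foldl_nil, pv_days_in_month, pvCUM, PySem.List.pyGet?, PySem.List.pyIdx?]
      norm_num
      cases hy : pv_is_leap_year year <;> simp [hy] <;> ring
    · rw [show PySem.List.pyRange 1 13 1 = [1,2,3,4,5,6,7,8,9,10,11,12] from by decide]
      simp only [List.foldl_cons, List.foldl_nil, pv_days_in_month, pvCUM, PySem.List.pyGet?, PySem.List.pyIdx?]
      norm_num
      cases hy : pv_is_leap_year year <;> simp [hy] <;> ring
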